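-- pv_equiv track=rewrite | github.com/danilocesar1002/sort-tests | tex_structs.py | heapToTeX
-- ===== SOURCE A (Python) =====
-- def log2Floor(n):
--     res = 1
--     while (n >> res) > 0:
--         res += 1
--
--     return res - 1
--
-- def heapToTeX(arr,
--              heapSize = -1,
--              config="[scale=0.7,heapnode/.style={circle, draw=black, very thick}" +
--              ",arraynode/.style={circle, draw=black, fill=black!20, very thick}]"
--              ):
--     if heapSize == -1:
--         heapSize = len(arr)
--
--     assert len(arr) > 0
--     assert 0 <= heapSize <= len(arr)
--
--
--     coords = [[0, log2Floor(len(arr))]] + [None for _ in range(len(arr) - 1)]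
--     for i in range(len(arr) // 2):
--         left, right = i * 2 + 1, i * 2 + 2
--         siblingDistance = 2 ** (coords[i][1] - 1)
--
--         if left < len(arr):
--             coords[left] = [
--                 coords[i][0] - siblingDistance,
--                 coords[i][1] - 1
--             ]
--         if right < len(arr):
--             coords[right] = [
--                 coords[i][0] + siblingDistance,
--                 coords[i][1] - 1
--             ]
--
--     heapNodes = ["\\node[heapnode] ({}) at ({}, {}) {{{}}};".format(i, coords[i][0], coords[i][1], arr[i]) for i in range(heapSize)]
--     arrayNodes = ["\\node[arraynode] ({}) at ({}, {}) {{{}}};".format(i, coords[i][0], coords[i][1], arr[i]) for i in range(heapSize, len(arr))]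
--     nodes = heapNodes + arrayNodes
--
--     lines = []
--     for i in range(len(arr) // 2):
--         left, right = i * 2 + 1, i * 2 + 2
--         if left < heapSize:
--             lines.append("({}) edge ({})".format(i, left))
--         if right < heapSize:
--             lines.append("({}) edge ({})".format(i, right))
--
--
--     return  "\\begin{{tikzpicture}}{}\n{}\n{}\n\\end{{tikzpicture}}".format(config, "\n".join(nodes), "\\draw\n" + "\n".join(lines) + ";")
-- ===== SOURCE B (Python) =====
-- def _bits(t):
--     # floor(log2(t)) for t >= 1: number of halvings down to 1
--     d = 0
--     while t > 1:
--         t >>= 1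
--         d += 1
--     return d
--
-- def _coord(k, L):
--     # coordinate of heap node k, computed independently by walking up to the root
--     x = 0
--     j = k
--     while j > 0:
--         step = 1 << (L - _bits(j + 1))
--         x += step if j % 2 == 0 else -step
--         j = (j - 1) >> 1
--     return x, L - _bits(k + 1)
--
-- def heapToTeX(arr,
--              heapSize = -1,
--              config="[scale=0.7,heapnode/.style={circle, draw=black, very thick}" +
--              ",arraynode/.style={circle, draw=black, fill=black!20, very thick}]"
--              ):
--     if heapSize == -1:
--         heapSize = len(arr)
--     assert len(arr) > 0
--     assert 0 <= heapSize <= len(arr)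
--
--     n = len(arr)
--     L = _bits(n)
--     nodes = []
--     for i in range(n):
--         x, y = _coord(i, L)
--         style = "heapnode" if i < heapSize else "arraynode"
--         nodes.append("\\node[{}] ({}) at ({}, {}) {{{}}};".format(style, i, x, y, arr[i]))
--     edges = ["({}) edge ({})".format((k - 1) >> 1, k) for k in range(1, heapSize)]
--     return ("\\begin{tikzpicture}" + config + "\n" + "\n".join(nodes) +
--             "\n\\draw\n" + "\n".join(edges) + ";\n\\end{tikzpicture}")
-- ===== Notes on version B (the rewrite author's own statement) =====
-- stated objective: alternative
-- what changed: B drops A's mutable coordinate table and parent-to-child propagation loop: each node's (x, y) is computed independently in closed form from its index (depth via bit length, x by walking the ancestor chain upward), and edges are enumerated per child instead of per parent; the node/edge string building and final format are unchanged.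
import Mathlib
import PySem

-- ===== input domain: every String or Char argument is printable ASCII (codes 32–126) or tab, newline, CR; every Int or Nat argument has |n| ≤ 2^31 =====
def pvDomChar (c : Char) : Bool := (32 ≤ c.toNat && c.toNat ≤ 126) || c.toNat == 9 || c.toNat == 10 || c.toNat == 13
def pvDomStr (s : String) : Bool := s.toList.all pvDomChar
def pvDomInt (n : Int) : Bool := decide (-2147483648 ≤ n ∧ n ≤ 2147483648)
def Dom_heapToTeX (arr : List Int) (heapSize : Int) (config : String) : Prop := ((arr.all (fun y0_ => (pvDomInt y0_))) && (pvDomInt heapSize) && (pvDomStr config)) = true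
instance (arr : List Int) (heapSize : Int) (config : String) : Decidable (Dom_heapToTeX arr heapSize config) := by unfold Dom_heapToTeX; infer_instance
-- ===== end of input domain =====

-- B replaces A's two-phase coords array (root coordinate + parent-to-child propagation loop over the
-- array) by an independent per-node coordinate computed by walking the node's ancestor path upward;
-- objective: alternative (same cost, no mutable coords table). Output strings are identical.

-- ===== PORT A =====
-- while (n >> res) > 0: res += 1  — terminates since n >> res > 0 forces res < n
def log2FloorGo (n res : Nat) : Nat :=
  if n >>> res > 0 then log2FloorGo n (res + 1) else res
termination_by n - res
decreasing_by
  rename_i h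
  rw [Nat.shiftRight_eq_div_pow] at h
  have h2 : 2 ^ res ≤ n := (Nat.div_pos_iff.mp h).2
  have := Nat.lt_two_pow_self (n := res)
  omega

def log2Floor (n : Nat) : Nat := log2FloorGo n 1 - 1

def heapToTeX (arr : List Int) (heapSize : Int) (config : String) : String :=
  let n := arr.length
  let hs : Int := if heapSize = -1 then (n : Int) else heapSize
  -- asserts len(arr) > 0 and 0 <= heapSize <= len(arr): AssertionError excluded by Pre_
  let L : Int := (log2Floor n : Int)
  let coords0 : List (Option (Int × Int)) := [some (0, L)] ++ List.replicate (n - 1) none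
  let coords := (List.range (n / 2)).foldl (fun cs i =>
      let ci := (cs.getD i none).getD (0, 0)        -- coords[i]; the None default is never read inside Pre_
      let sd : Int := 2 ^ (ci.2 - 1).toNat          -- 2 ** (coords[i][1]-1); the exponent is ≥ 0 at every executed step inside Pre_, so toNat is exact
      let left := i * 2 + 1
      let right := i * 2 + 2
      let cs1 := if left < n then cs.set left (some (ci.1 - sd, ci.2 - 1)) else cs
      if right < n then cs1.set right (some (ci.1 + sd, ci.2 - 1)) else cs1) coords0
  let heapNodes := (PySem.List.pyRange 0 hs 1).map (fun i =>
      let c := (PySem.List.pyGetD coords i none).getD (0, 0)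
      "\\node[heapnode] (" ++ PySem.Int.toStr i ++ ") at (" ++ PySem.Int.toStr c.1 ++ ", " ++
        PySem.Int.toStr c.2 ++ ") {" ++ PySem.Int.toStr (PySem.List.pyGetD arr i 0) ++ "};")
  let arrayNodes := (PySem.List.pyRange hs (n : Int) 1).map (fun i =>
      let c := (PySem.List.pyGetD coords i none).getD (0, 0)
      "\\node[arraynode] (" ++ PySem.Int.toStr i ++ ") at (" ++ PySem.Int.toStr c.1 ++ ", " ++
        PySem.Int.toStr c.2 ++ ") {" ++ PySem.Int.toStr (PySem.List.pyGetD arr i 0) ++ "};")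
  let nodes := heapNodes ++ arrayNodes
  let lines := (List.range (n / 2)).foldl (fun ls (i : Nat) =>
      let left := i * 2 + 1
      let right := i * 2 + 2
      let ls1 := if (left : Int) < hs then
          ls ++ ["(" ++ PySem.Int.toStr (i : Int) ++ ") edge (" ++ PySem.Int.toStr (left : Int) ++ ")"] else ls
      if (right : Int) < hs then
          ls1 ++ ["(" ++ PySem.Int.toStr (i : Int) ++ ") edge (" ++ PySem.Int.toStr (right : Int) ++ ")"] else ls1) []
  "\\begin{tikzpicture}" ++ config ++ "\n" ++ PySem.Str.join "\n" nodes ++ "\n" ++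
    ("\\draw\n" ++ PySem.Str.join "\n" lines ++ ";") ++ "\n\\end{tikzpicture}"

-- ===== PORT B =====
-- _bits(t): d = 0; while t > 1: t >>= 1; d += 1
def pvBitsGo (t d : Nat) : Nat :=
  if t > 1 then pvBitsGo (t / 2) (d + 1) else d
termination_by t
decreasing_by exact Nat.div_lt_self (by omega) (by omega)

def pvBits (t : Nat) : Nat := pvBitsGo t 0

-- _coord's upward walk over the ancestor chain j → (j-1)>>1
def pvCoordGo (L : Nat) (j : Nat) (x : Int) : Int :=
  if j > 0 then
    let step : Int := 1 <<< (L - pvBits (j + 1))   -- Nat subtraction: L - _bits(j+1) is ≥ 0 at every call B makes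
    pvCoordGo L ((j - 1) / 2) (if j % 2 = 0 then x + step else x - step)
  else x
termination_by j
decreasing_by omega

def pvCoord (k L : Nat) : Int × Int := (pvCoordGo L k 0, (L : Int) - (pvBits (k + 1) : Int))

def heapToTeX_alt (arr : List Int) (heapSize : Int) (config : String) : String :=
  let n := arr.length
  let hs : Int := if heapSize = -1 then (n : Int) else heapSize
  let L := pvBits n
  let nodes := (List.range n).map (fun i =>
      let c := pvCoord i L
      let style := if (i : Int) < hs then "heapnode" else "arraynode"
      "\\node[" ++ style ++ "] (" ++ PySem.Int.toStr (i : Int) ++ ") at (" ++ PySem.Int.toStr c.1 ++ ", " ++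
        PySem.Int.toStr c.2 ++ ") {" ++ PySem.Int.toStr (PySem.List.pyGetD arr (i : Int) 0) ++ "};")
  let edges := (PySem.List.pyRange 1 hs 1).map (fun (k : Int) =>
      "(" ++ PySem.Int.toStr ((k - 1) >>> (1 : Nat)) ++ ") edge (" ++ PySem.Int.toStr k ++ ")")
  "\\begin{tikzpicture}" ++ config ++ "\n" ++ PySem.Str.join "\n" nodes ++
    "\n\\draw\n" ++ PySem.Str.join "\n" edges ++ ";\n\\end{tikzpicture}"

-- ===== PRECONDITION & SPEC =====
-- A raises AssertionError on arr == [] and on heapSize outside {-1} ∪ [0, len(arr)]; excluded here.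
def Pre_heapToTeX (arr : List Int) (heapSize : Int) (config : String) : Prop :=
  arr ≠ [] ∧ (heapSize = -1 ∨ (0 ≤ heapSize ∧ heapSize ≤ arr.length))
instance (arr : List Int) (heapSize : Int) (config : String) : Decidable (Pre_heapToTeX arr heapSize config) := by
  unfold Pre_heapToTeX; infer_instance

def pvWitness_heapToTeX : List Int × Int × String := ([5, 3, 1], -1, "[c]")

def Spec_heapToTeX (arr : List Int) (heapSize : Int) (config : String) (out : String) : Prop := out = heapToTeX_alt arr heapSize config
instance (arr : List Int) (heapSize : Int) (config : String) (out : String) : Decidable (Spec_heapToTeX arr heapSize config out) := by unfold Spec_heapToTeX; infer_instance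

-- ===== CLAIM (what is proved, stated in full; the proofs are below) =====
def Claim_equal_heapToTeX : Prop := ∀ (arr : List Int) (heapSize : Int) (config : String), Dom_heapToTeX arr heapSize config → Pre_heapToTeX arr heapSize config → Spec_heapToTeX arr heapSize config (heapToTeX arr heapSize config)

-- ===== LEMMAS AND PROOFS =====

theorem log2_step (n : Nat) (h : 2 ≤ n) : Nat.log2 n = Nat.log2 (n/2) + 1 := by
  rw [Nat.log2_def]; simp [h]

theorem pvBitsGo_eq (t d : Nat) : pvBitsGo t d = d + Nat.log2 t := by
  induction t, d using pvBitsGo.induct with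
  | case1 t d h ih =>
    rw [pvBitsGo]; simp only [h, if_pos]
    rw [ih, log2_step t h]; omega
  | case2 t d h =>
    rw [pvBitsGo]; simp only [h]
    interval_cases t <;> rw [Nat.log2_def] <;> simp

theorem pvBits_eq (t : Nat) : pvBits t = Nat.log2 t := by
  simp [pvBits, pvBitsGo_eq]

theorem log2FloorGo_eq (n res : Nat) (hn : 1 ≤ n) (hres : res ≤ Nat.log2 n + 1) :
    log2FloorGo n res = Nat.log2 n + 1 := by
  induction res using log2FloorGo.induct n with
  | case1 res h ih =>
    rw [log2FloorGo, if_pos h]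
    apply ih
    rw [Nat.shiftRight_eq_div_pow] at h
    have h2 : 2 ^ res ≤ n := (Nat.div_pos_iff.mp h).2
    have := (Nat.le_log2 (by omega)).2 h2
    omega
  | case2 res h =>
    rw [log2FloorGo, if_neg h]
    rw [Nat.shiftRight_eq_div_pow] at h
    have h2 : n < 2 ^ res := by
      by_contra hc
      have : 0 < n / 2 ^ res := Nat.div_pos (by omega) (Nat.pow_pos (by omega))
      omega
    have := (Nat.log2_lt (by omega)).2 h2
    omega

theorem log2Floor_eq (n : Nat) (hn : 1 ≤ n) : log2Floor n = Nat.log2 n := by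
  simp [log2Floor, log2FloorGo_eq n 1 hn (by omega)]

theorem log2_le_of_le {m n : Nat} (hm : 1 ≤ m) (h : m ≤ n) : Nat.log2 m ≤ Nat.log2 n := by
  have h1 : 2 ^ Nat.log2 m ≤ m := Nat.log2_self_le (by omega)
  exact (Nat.le_log2 (by omega)).2 (le_trans h1 h)

theorem log2_double (i : Nat) : Nat.log2 (2 * i + 2) = Nat.log2 (i + 1) + 1 := by
  rw [log2_step (2*i+2) (by omega)]
  congr 2
  omega

theorem log2_double' (i : Nat) : Nat.log2 (2 * i + 3) = Nat.log2 (i + 1) + 1 := by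
  rw [log2_step (2*i+3) (by omega)]
  congr 2
  omega

theorem pvCoordGo_shift (L j : Nat) (x : Int) : pvCoordGo L j x = x + pvCoordGo L j 0 := by
  induction j using Nat.strong_induction_on generalizing x with
  | _ j ih =>
    by_cases h : j > 0
    · have ihp := ih ((j-1)/2) (by omega)
      rw [pvCoordGo, if_pos h]
      conv_rhs => rw [pvCoordGo, if_pos h]
      simp only
      split_ifs with hp
      · rw [ihp]; conv_rhs => rw [ihp]
        ring
      · rw [ihp]; conv_rhs => rw [ihp]
        ring
    · rw [pvCoordGo, if_neg h, pvCoordGo, if_neg h]; ring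

theorem pvCoord_zero (L : Nat) : pvCoord 0 L = (0, (L : Int)) := by
  unfold pvCoord
  rw [pvCoordGo]
  simp [pvBits_eq, Nat.log2_def]

theorem pvCoord_left (i L : Nat) :
    pvCoord (2 * i + 1) L =
      ((pvCoord i L).1 - 2 ^ (L - (Nat.log2 (i + 1) + 1)), (L : Int) - ((Nat.log2 (i + 1) + 1 : Nat) : Int)) := by
  unfold pvCoord
  rw [pvCoordGo, if_pos (by omega)]
  simp only
  have e1 : (2 * i + 1 - 1) / 2 = i := by omega
  have e2 : (2 * i + 1) % 2 = 1 := by omega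
  have e3 : 2 * i + 1 + 1 = 2 * i + 2 := by omega
  rw [e1, e2, e3, pvBits_eq, log2_double, pvCoordGo_shift]
  rw [Prod.mk.injEq]
  refine ⟨?_, rfl⟩
  norm_num [Nat.shiftLeft_eq]
  ring

theorem pvCoord_right (i L : Nat) :
    pvCoord (2 * i + 2) L =
      ((pvCoord i L).1 + 2 ^ (L - (Nat.log2 (i + 1) + 1)), (L : Int) - ((Nat.log2 (i + 1) + 1 : Nat) : Int)) := by
  unfold pvCoord
  rw [pvCoordGo, if_pos (by omega)]
  simp only
  have e1 : (2 * i + 2 - 1) / 2 = i := by omega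
  have e2 : (2 * i + 2) % 2 = 0 := by omega
  have e3 : 2 * i + 2 + 1 = 2 * i + 3 := by omega
  rw [e1, e2, e3, pvBits_eq, log2_double', pvCoordGo_shift]
  rw [Prod.mk.injEq]
  refine ⟨?_, rfl⟩
  norm_num [Nat.shiftLeft_eq]
  ring

-- the coordinate table A builds, described pointwise after m loop steps
def coordsAfter (n L m : Nat) : List (Option (Int × Int)) :=
  (List.range n).map (fun k => if k < 2 * m + 1 then some (pvCoord k L) else none)

theorem set_map_range {β : Type} (f : Nat → β) (n j : Nat) (v : β) (_hj : j < n) :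
    ((List.range n).map f).set j v = (List.range n).map (fun k => if k = j then v else f k) := by
  apply List.ext_getElem
  · simp
  · intro k h1 h2
    simp only [List.getElem_set, List.getElem_map, List.getElem_range] at *
    split_ifs with hc hc2 hc3 <;> first | rfl | omega

theorem coordsAfter_zero (n L : Nat) (hn : 1 ≤ n) :
    coordsAfter n L 0 = [some (0, (L : Int))] ++ List.replicate (n - 1) none := by
  unfold coordsAfter
  obtain ⟨n', rfl⟩ : ∃ n', n = n' + 1 := ⟨n - 1, by omega⟩
  rw [List.range_succ_eq_map]
  simp [pvCoord_zero, Function.comp_def]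

theorem coords_step (n L m : Nat) (hm : m < n / 2) (hgl : Nat.log2 (m + 1) + 1 ≤ L) :
    (let cs := coordsAfter n L m
     let ci := (cs.getD m none).getD ((0 : Int), (0 : Int))
     let sd : Int := 2 ^ (ci.2 - 1).toNat
     let left := m * 2 + 1
     let right := m * 2 + 2
     let cs1 := if left < n then cs.set left (some (ci.1 - sd, ci.2 - 1)) else cs
     if right < n then cs1.set right (some (ci.1 + sd, ci.2 - 1)) else cs1)
    = coordsAfter n L (m + 1) := by
  have hln : 2 * m + 2 ≤ n := by omega
  have hmn : m < n := by omega
  simp only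
  have hget : ((coordsAfter n L m).getD m none) = some (pvCoord m L) := by
    unfold coordsAfter
    rw [PySem.List.getD_map_range _ _ _ _ hmn]
    simp only [if_pos (by omega : m < 2 * m + 1)]
  rw [hget]
  simp only [Option.getD_some]
  set g := Nat.log2 (m + 1) with hg
  have hy : (pvCoord m L).2 = (L : Int) - (g : Int) := by
    unfold pvCoord
    rw [pvBits_eq, hg]
  have hsd : (2 : Int) ^ (((pvCoord m L).2 - 1).toNat) = 2 ^ (L - (g + 1)) := by
    rw [hy]
    congr 1
    omega
  rw [if_pos (by omega : m * 2 + 1 < n)]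
  by_cases hr : m * 2 + 2 < n
  · rw [if_pos hr]
    unfold coordsAfter
    rw [set_map_range _ _ _ _ (by omega), set_map_range _ _ _ _ (by omega)]
    apply List.map_congr_left
    intro k hk
    rw [List.mem_range] at hk
    by_cases h1 : k = m * 2 + 2
    · subst h1
      rw [if_pos rfl]
      have : m * 2 + 2 = 2 * m + 2 := by ring_nf
      rw [this, pvCoord_right, hsd, hy]
      rw [if_pos (by omega)]
      push_cast
      rw [hg]
      ring_nf
    · rw [if_neg h1]
      by_cases h2 : k = m * 2 + 1
      · subst h2
        rw [if_pos rfl]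
        have : m * 2 + 1 = 2 * m + 1 := by ring_nf
        rw [this, pvCoord_left, hsd, hy]
        rw [if_pos (by omega)]
        push_cast
        rw [hg]
        ring_nf
      · rw [if_neg h2]
        by_cases hk2 : k < 2 * m + 1
        · rw [if_pos hk2, if_pos (by omega)]
        · rw [if_neg hk2, if_neg (by omega)]
  · rw [if_neg hr]
    unfold coordsAfter
    rw [set_map_range _ _ _ _ (by omega)]
    apply List.map_congr_left
    intro k hk
    rw [List.mem_range] at hk
    by_cases h2 : k = m * 2 + 1
    · subst h2
      rw [if_pos rfl]
      have : m * 2 + 1 = 2 * m + 1 := by ring_nf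
      rw [this, pvCoord_left, hsd, hy]
      rw [if_pos (by omega)]
      push_cast
      rw [hg]
      ring_nf
    · rw [if_neg h2]
      by_cases hk2 : k < 2 * m + 1
      · rw [if_pos hk2, if_pos (by omega)]
      · rw [if_neg hk2, if_neg (by omega)]

theorem coords_fold (n L : Nat) (hgl : ∀ m : Nat, m < n / 2 → Nat.log2 (m + 1) + 1 ≤ L) (M : Nat) (hM : M ≤ n / 2) :
    (List.range M).foldl (fun cs i =>
      let ci := (cs.getD i none).getD ((0 : Int), (0 : Int))
      let sd : Int := 2 ^ (ci.2 - 1).toNat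
      let left := i * 2 + 1
      let right := i * 2 + 2
      let cs1 := if left < n then cs.set left (some (ci.1 - sd, ci.2 - 1)) else cs
      if right < n then cs1.set right (some (ci.1 + sd, ci.2 - 1)) else cs1)
      (coordsAfter n L 0)
    = coordsAfter n L M := by
  induction M with
  | zero => rfl
  | succ m ih =>
    rw [List.range_succ, List.foldl_append, ih (by omega), List.foldl_cons, List.foldl_nil]
    exact coords_step n L m (by omega) (hgl m (by omega))


theorem shift_half (m : Nat) : ((↑(2*m) : Int)) >>> (1:Nat) = ↑m := by
  rw [← Int.natCast_shiftRight]
  simp [Nat.shiftRight_eq_div_pow]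

theorem linesA_eq (H : Nat) (q : Nat) :
    (List.range q).foldl
      (fun ls (i : Nat) =>
        if (↑(i * 2 + 2) : Int) < (↑H : Int) then
          (if (↑(i * 2 + 1) : Int) < ↑H then
              ls ++ ["(" ++ PySem.Int.toStr ↑i ++ ") edge (" ++ PySem.Int.toStr ↑(i * 2 + 1) ++ ")"]
            else ls) ++
            ["(" ++ PySem.Int.toStr ↑i ++ ") edge (" ++ PySem.Int.toStr ↑(i * 2 + 2) ++ ")"]
        else
          if (↑(i * 2 + 1) : Int) < ↑H then
            ls ++ ["(" ++ PySem.Int.toStr ↑i ++ ") edge (" ++ PySem.Int.toStr ↑(i * 2 + 1) ++ ")"]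
          else ls)
      []
    = (List.range' 1 (min (2*q) (H-1))).map
        (fun (k : Nat) => "(" ++ PySem.Int.toStr (((k : Int) - 1) >>> (1:Nat)) ++ ") edge (" ++ PySem.Int.toStr ↑k ++ ")") := by
  induction q with
  | zero => simp
  | succ m ih =>
    rw [List.range_succ, List.foldl_append, ih, List.foldl_cons, List.foldl_nil]
    have el : ("(" ++ PySem.Int.toStr ↑m ++ ") edge (" ++ PySem.Int.toStr ↑(m * 2 + 1) ++ ")")
        = "(" ++ PySem.Int.toStr ((((1 + 2*m : Nat) : Int) - 1) >>> (1:Nat)) ++ ") edge (" ++ PySem.Int.toStr ↑(1 + 2*m) ++ ")" := by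
      have e1 : ((↑(1 + 2*m) : Int) - 1) = ↑(2*m) := by push_cast; ring
      rw [e1, shift_half, show 1 + 2*m = m*2+1 from by omega]
    have er : ("(" ++ PySem.Int.toStr ↑m ++ ") edge (" ++ PySem.Int.toStr ↑(m * 2 + 2) ++ ")")
        = "(" ++ PySem.Int.toStr ((((1 + (2*m+1) : Nat) : Int) - 1) >>> (1:Nat)) ++ ") edge (" ++ PySem.Int.toStr ↑(1 + (2*m+1)) ++ ")" := by
      have e1 : ((↑(1 + (2*m+1)) : Int) - 1) = ↑(2*m+1) := by push_cast; ring
      have e2 : ((↑(2*m+1) : Int)) >>> (1:Nat) = ↑m := by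
        rw [← Int.natCast_shiftRight]
        simp [Nat.shiftRight_eq_div_pow]
        omega
      rw [e1, e2, show 1 + (2*m+1) = m*2+2 from by omega]
    by_cases c2 : m * 2 + 2 < H
    · rw [if_pos (by exact_mod_cast c2), if_pos (by exact_mod_cast (show m*2+1 < H by omega))]
      rw [show min (2*m) (H-1) = 2*m from by omega, show min (2*(m+1)) (H-1) = (2*m+1)+1 from by omega]
      rw [List.range'_concat, show 2*m+1 = (2*m)+1 from rfl, List.range'_concat]
      simp only [List.map_append, List.map_cons, List.map_nil, List.append_assoc, one_mul]
      rw [el, er]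
    · by_cases c1 : m * 2 + 1 < H
      · rw [if_neg (by exact_mod_cast c2), if_pos (by exact_mod_cast c1)]
        rw [show min (2*m) (H-1) = 2*m from by omega, show min (2*(m+1)) (H-1) = (2*m)+1 from by omega]
        rw [List.range'_concat]
        simp only [List.map_append, List.map_cons, List.map_nil, one_mul]
        rw [el]
      · rw [if_neg (by exact_mod_cast c2), if_neg (by exact_mod_cast c1)]
        rw [show min (2*m) (H-1) = min (2*(m+1)) (H-1) from by omega]
theorem pvGlue (c s s' t t' : String) (hs : s = s') (ht : t = t') :
    "\\begin{tikzpicture}" ++ c ++ "\n" ++ s ++ "\n" ++ ("\\draw\n" ++ t ++ ";") ++ "\n\\end{tikzpicture}" =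
    "\\begin{tikzpicture}" ++ c ++ "\n" ++ s' ++ "\n\\draw\n" ++ t' ++ ";\n\\end{tikzpicture}" := by
  subst hs ht
  simp only [String.append_assoc]
  rw [← String.append_assoc (s₁ := "\n") (s₂ := "\\draw\n")]
  rfl

-- ===== VERDICT (by name: the statement is the Claim_ definition above) =====
theorem heapToTeX_spec : Claim_equal_heapToTeX := by
  intro arr heapSize config hdom hpre
  obtain ⟨hne, hhs⟩ := hpre
  have hn : 1 ≤ arr.length := List.length_pos_of_ne_nil hne
  unfold Spec_heapToTeX heapToTeX heapToTeX_alt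
  simp only
  rw [log2Floor_eq _ hn, pvBits_eq]
  set h : Int := if heapSize = -1 then (arr.length : Int) else heapSize with hh
  have h0 : 0 ≤ h := by
    rw [hh]; split_ifs with hc
    · exact Int.natCast_nonneg _
    · rcases hhs with h1 | ⟨h1, _⟩
      · exact absurd h1 hc
      · exact h1
  have hle : h ≤ (arr.length : Int) := by
    rw [hh]; split_ifs with hc
    · exact le_refl _
    · rcases hhs with h1 | ⟨_, h2⟩
      · exact absurd h1 hc
      · exact h2
  have hgl : ∀ m, m < arr.length / 2 → Nat.log2 (m+1) + 1 ≤ Nat.log2 arr.length := by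
    intro m hm
    have h2 : 2*m+2 ≤ arr.length := by omega
    calc Nat.log2 (m+1) + 1 = Nat.log2 (2*m+2) := (log2_double m).symm
    _ ≤ _ := log2_le_of_le (by omega) h2
  rw [← coordsAfter_zero arr.length (Nat.log2 arr.length) hn]
  rw [coords_fold arr.length (Nat.log2 arr.length) hgl (arr.length / 2) le_rfl]
  have hHh : h = ((h.toNat : Nat) : Int) := (Int.toNat_of_nonneg h0).symm
  set H := h.toNat with hHdef
  have hHn : H ≤ arr.length := by omega
  rw [hHh]
  have hlook : ∀ k : Nat, k < arr.length →
      (PySem.List.pyGetD (coordsAfter arr.length (Nat.log2 arr.length) (arr.length / 2)) (↑k) none).getD ((0:Int),(0:Int))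
        = pvCoord k (Nat.log2 arr.length) := by
    intro k hkn
    rw [PySem.List.pyGetD_natCast]
    unfold coordsAfter
    rw [PySem.List.getD_map_range _ _ _ _ hkn]
    rw [if_pos (by omega)]
    simp
  refine pvGlue config _ _ _ _ (congrArg (PySem.Str.join "\n") ?_) (congrArg (PySem.Str.join "\n") ?_)
  · -- nodes
    apply List.ext_getElem
    · simp [PySem.List.length_pyRange_one]
      omega
    · intro k hk1 hk2
      simp only [List.length_map, List.length_range] at hk2
      by_cases hkH : k < H
      · rw [List.getElem_append_left (by simp [PySem.List.length_pyRange_one]; omega)]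
        simp only [List.getElem_map, PySem.List.getElem_pyRange_one, List.getElem_range]
        rw [zero_add, hlook k hk2]
        rw [if_pos (by exact_mod_cast hkH : ((k:Nat):Int) < ↑H)]
        rfl
      · rw [List.getElem_append_right (by simp [PySem.List.length_pyRange_one]; omega)]
        simp only [List.getElem_map, PySem.List.getElem_pyRange_one, List.getElem_range,
          List.length_map, PySem.List.length_pyRange_one]
        have e : ((H:Int) + ↑(k - ((H:Int) - 0).toNat)) = ↑k := by omega
        rw [e, hlook k hk2]
        rw [if_neg (by exact_mod_cast hkH : ¬ ((k:Nat):Int) < ↑H)]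
        rfl
      
  · -- lines
    rw [linesA_eq H (arr.length / 2)]
    rw [show min (2*(arr.length/2)) (H-1) = H - 1 from by omega]
    rw [List.range'_eq_map_range, List.map_map]
    rw [PySem.List.pyRange_one, List.map_map]
    rw [show ((H:Int) - 1).toNat = H - 1 from by omega]
    apply List.map_congr_left
    intro j hj
    simp only [Function.comp_apply]
    have e : ((1 + j : Nat) : Int) = 1 + (j:Int) := by push_cast; ring
    rw [e]
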